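-- pv_equiv track=rewrite | github.com/ooleem-generator/CodingTest-Selfstudy | 백준/Gold/1074. Z/Z.py | route_finder
-- ===== SOURCE A (Python) =====
-- def route_finder(N, r, c, min_r, min_c, max_r, max_c, route_tracking):
--
--     if N == 0:
--         return route_tracking
--
--     mid_r = (min_r + max_r) // 2
--     mid_c = (min_c + max_c) // 2
--
--     if r < mid_r:
--         if c < mid_c:  # 1사분면
--             route_tracking.append(0)
--             max_r = mid_r
--             max_c = mid_c
--         else:  # 2사분면
--             route_tracking.append(1)
--             max_r = mid_r
--             min_c = mid_c
--     else:
--         if c < mid_c:  # 3사분면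
--             route_tracking.append(2)
--             min_r = mid_r
--             max_c = mid_c
--         else:  # 4사분면
--             route_tracking.append(3)
--             min_r = mid_r
--             min_c = mid_c
--
--     route_finder(N - 1, r, c, min_r, min_c, max_r, max_c, route_tracking)
--
--     return route_tracking
-- ===== SOURCE B (Python) =====
-- def route_finder(N, r, c, min_r, min_c, max_r, max_c, route_tracking):
--     # Decompose the 2-D quadrant walk into two independent 1-D bisections,
--     # then combine the row bit (worth 2) and column bit (worth 1) per level.
--     def axis_bits(x, lo, hi, n):
--         bits = []
--         for _ in range(n):
--             mid = (lo + hi) // 2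
--             if x < mid:
--                 bits.append(0)
--                 hi = mid
--             else:
--                 bits.append(1)
--                 lo = mid
--         return bits
--
--     row_bits = axis_bits(r, min_r, max_r, N)
--     col_bits = axis_bits(c, min_c, max_c, N)
--     route_tracking += [2 * rb + cb for rb, cb in zip(row_bits, col_bits)]
--     return route_tracking
-- ===== Notes on version B (the rewrite author's own statement) =====
-- stated objective: alternative
-- what changed: Replaces the 2-D recursive quadrant descent carrying four bounds with two independent 1-D iterative bisections (row and column), whose per-level bits are then combined as 2*row_bit+col_bit and appended in one pass.
import Mathlib
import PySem

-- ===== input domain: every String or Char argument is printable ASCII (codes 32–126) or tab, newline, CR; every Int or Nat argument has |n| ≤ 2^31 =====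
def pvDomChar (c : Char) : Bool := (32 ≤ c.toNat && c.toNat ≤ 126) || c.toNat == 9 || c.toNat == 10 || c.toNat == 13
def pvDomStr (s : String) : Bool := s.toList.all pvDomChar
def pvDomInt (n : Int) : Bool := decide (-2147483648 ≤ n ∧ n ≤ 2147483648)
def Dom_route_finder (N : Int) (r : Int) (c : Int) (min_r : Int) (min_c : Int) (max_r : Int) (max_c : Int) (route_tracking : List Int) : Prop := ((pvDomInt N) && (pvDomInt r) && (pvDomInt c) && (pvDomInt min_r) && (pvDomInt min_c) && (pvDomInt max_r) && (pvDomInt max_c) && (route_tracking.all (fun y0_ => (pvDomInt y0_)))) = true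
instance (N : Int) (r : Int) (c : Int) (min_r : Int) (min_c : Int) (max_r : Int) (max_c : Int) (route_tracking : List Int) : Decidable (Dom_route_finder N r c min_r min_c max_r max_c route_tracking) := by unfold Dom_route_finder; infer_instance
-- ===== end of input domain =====

-- B replaces the 2-D recursive quadrant descent with two independent 1-D bisections
-- combined per level (alternative decomposition, same cost). A mutates route_tracking
-- in place via append; B mutates it in place via `+=` — the theorems are about the
-- returned value.

-- ===== PORT A =====
-- The recursion `if N == 0: return …; …; route_finder(N-1, …)` is run on fuel
-- N.toNat, which is exactly A's recursion depth for N ≥ 0 (Pre_ excludes N < 0,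
-- where A never reaches its base case and raises RecursionError).
def route_finder_go (fuel : Nat) (r c min_r min_c max_r max_c : Int) (rt : List Int) : List Int :=
  match fuel with
  | 0 => rt
  | f + 1 =>
    let mid_r := PySem.Int.floordiv (min_r + max_r) 2
    let mid_c := PySem.Int.floordiv (min_c + max_c) 2
    if r < mid_r then
      if c < mid_c then route_finder_go f r c min_r min_c mid_r mid_c (rt ++ [0])
      else route_finder_go f r c min_r mid_c mid_r max_c (rt ++ [1])
    else
      if c < mid_c then route_finder_go f r c mid_r min_c max_r mid_c (rt ++ [2])
      else route_finder_go f r c mid_r mid_c max_r max_c (rt ++ [3])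

def route_finder (N : Int) (r : Int) (c : Int) (min_r : Int) (min_c : Int) (max_r : Int) (max_c : Int) (route_tracking : List Int) : List Int :=
  route_finder_go N.toNat r c min_r min_c max_r max_c route_tracking

-- ===== PORT B =====
-- axis_bits: the `for _ in range(n)` bisection loop producing one bit per level.
def axisBits (n : Nat) (x lo hi : Int) : List Int :=
  match n with
  | 0 => []
  | k + 1 =>
    let mid := PySem.Int.floordiv (lo + hi) 2
    if x < mid then 0 :: axisBits k x lo mid
    else 1 :: axisBits k x mid hi

def route_finder_alt (N : Int) (r : Int) (c : Int) (min_r : Int) (min_c : Int) (max_r : Int) (max_c : Int) (route_tracking : List Int) : List Int :=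
  let row_bits := axisBits N.toNat r min_r max_r
  let col_bits := axisBits N.toNat c min_c max_c
  route_tracking ++ (List.zip row_bits col_bits).map (fun p => 2 * p.1 + p.2)

-- ===== PRECONDITION & SPEC =====
-- Pre_ excludes the inputs on which A raises RecursionError: negative N (A decrements
-- N forever, never reaching its base case) and large N (A's recursion is N frames deep,
-- exceeding the interpreter's recursion limit; 8000 stays safely below it).
def Pre_route_finder (N : Int) (r : Int) (c : Int) (min_r : Int) (min_c : Int) (max_r : Int) (max_c : Int) (route_tracking : List Int) : Prop := 0 ≤ N ∧ N ≤ 8000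
instance (N : Int) (r : Int) (c : Int) (min_r : Int) (min_c : Int) (max_r : Int) (max_c : Int) (route_tracking : List Int) : Decidable (Pre_route_finder N r c min_r min_c max_r max_c route_tracking) := by unfold Pre_route_finder; infer_instance

def pvWitness_route_finder : Int × Int × Int × Int × Int × Int × Int × List Int := (3, 2, 5, 0, 0, 8, 8, [])

def Spec_route_finder (N : Int) (r : Int) (c : Int) (min_r : Int) (min_c : Int) (max_r : Int) (max_c : Int) (route_tracking : List Int) (out : List Int) : Prop := out = route_finder_alt N r c min_r min_c max_r max_c route_tracking
instance (N : Int) (r : Int) (c : Int) (min_r : Int) (min_c : Int) (max_r : Int) (max_c : Int) (route_tracking : List Int) (out : List Int) : Decidable (Spec_route_finder N r c min_r min_c max_r max_c route_tracking out) := by unfold Spec_route_finder; infer_instance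

-- ===== CLAIM (what is proved, stated in full; the proofs are below) =====
def Claim_equal_route_finder : Prop := ∀ (N : Int) (r : Int) (c : Int) (min_r : Int) (min_c : Int) (max_r : Int) (max_c : Int) (route_tracking : List Int), Dom_route_finder N r c min_r min_c max_r max_c route_tracking → Pre_route_finder N r c min_r min_c max_r max_c route_tracking → Spec_route_finder N r c min_r min_c max_r max_c route_tracking (route_finder N r c min_r min_c max_r max_c route_tracking)


-- ===== LEMMAS AND PROOFS =====
-- The quadrant walk decomposes: each level's digit is 2*(row bit) + (col bit), and
-- the row/column bound updates are independent of the other axis.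
theorem route_finder_go_eq (fuel : Nat) : ∀ (r c min_r min_c max_r max_c : Int) (rt : List Int),
    route_finder_go fuel r c min_r min_c max_r max_c rt =
      rt ++ (List.zip (axisBits fuel r min_r max_r) (axisBits fuel c min_c max_c)).map
        (fun p => 2 * p.1 + p.2) := by
  induction fuel with
  | zero => intro r c min_r min_c max_r max_c rt; simp [route_finder_go, axisBits]
  | succ f ih =>
    intro r c min_r min_c max_r max_c rt
    simp only [route_finder_go, axisBits]
    split_ifs <;> simp [ih, List.zip_cons_cons]

-- ===== VERDICT (by name: the statement is the Claim_ definition above) =====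
theorem route_finder_spec : Claim_equal_route_finder := by
  intro N r c min_r min_c max_r max_c rt _ _
  unfold Spec_route_finder route_finder route_finder_alt
  exact route_finder_go_eq N.toNat r c min_r min_c max_r max_c rt
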